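-- pv_equiv track=rewrite | github.com/posl/comment_recommendation | script/split_gen/5_time/en/160_C/6.py | solve
-- ===== SOURCE A (Python) =====
-- def solve(k,n,a):
--     distance = []
--     for i in range(n):
--         if i == n-1:
--             distance.append(k-a[i]+a[0])
--         else:
--             distance.append(a[i+1]-a[i])
--     distance.sort()
--     distance.pop()
--     return sum(distance)
-- ===== SOURCE B (Python) =====
-- def solve(k, n, a):
--     # circular gaps sum to exactly k, so the answer is k minus the largest gap:
--     # one pass tracking the maximum gap, no list, no sort, no summation.
--     max_gap = k - a[n - 1] + a[0]
--     for i in range(n - 1):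
--         gap = a[i + 1] - a[i]
--         if gap > max_gap:
--             max_gap = gap
--     return k - max_gap
-- ===== Notes on version B (the rewrite author's own statement) =====
-- stated objective: faster
-- what changed: Uses the invariant that the circular gaps telescope to exactly k, so the answer is k minus the single largest gap: one pass tracking the running maximum replaces building a gap list, sorting it, popping and summing.
import Mathlib
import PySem

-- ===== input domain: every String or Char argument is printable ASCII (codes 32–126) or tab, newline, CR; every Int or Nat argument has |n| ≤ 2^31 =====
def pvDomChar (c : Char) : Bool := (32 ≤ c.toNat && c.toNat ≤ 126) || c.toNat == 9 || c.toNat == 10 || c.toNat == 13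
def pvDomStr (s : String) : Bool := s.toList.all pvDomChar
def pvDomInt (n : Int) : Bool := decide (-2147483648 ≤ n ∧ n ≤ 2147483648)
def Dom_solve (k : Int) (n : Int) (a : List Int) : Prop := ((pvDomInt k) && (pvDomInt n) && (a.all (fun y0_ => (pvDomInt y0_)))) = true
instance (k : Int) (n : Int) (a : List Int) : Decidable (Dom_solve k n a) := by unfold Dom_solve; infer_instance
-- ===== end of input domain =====

-- B replaces A's build-gap-list / sort / pop / sum by a single pass tracking the maximum
-- circular gap and returning k minus it (the circular gaps telescope to k).

-- ===== PORT A =====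
-- a[i] is ported as pyGetD a i 0: total form of Python indexing, exact under Pre_solve
-- (every index A uses is then in range).  distance.pop() removes the last element
-- (IndexError on []); under Pre_solve the list is nonempty, so it is ported as dropLast.
def solve (k : Int) (n : Int) (a : List Int) : Int :=
  let distance := (PySem.List.pyRange 0 n 1).map (fun i =>
    if i = n - 1 then k - PySem.List.pyGetD a i 0 + PySem.List.pyGetD a 0 0
    else PySem.List.pyGetD a (i + 1) 0 - PySem.List.pyGetD a i 0)
  let s := PySem.List.sorted distance (fun x => x) false
  s.dropLast.sum

-- ===== PORT B =====
def solve_alt (k : Int) (n : Int) (a : List Int) : Int :=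
  let mg0 := k - PySem.List.pyGetD a (n - 1) 0 + PySem.List.pyGetD a 0 0
  let mg := (PySem.List.pyRange 0 (n - 1) 1).foldl (fun mg i =>
    let gap := PySem.List.pyGetD a (i + 1) 0 - PySem.List.pyGetD a i 0
    if gap > mg then gap else mg) mg0
  k - mg

-- ===== PRECONDITION & SPEC =====
-- Exactly the inputs on which the Python A returns: n ≥ 1 (else distance.pop() raises
-- IndexError on the empty list) and n ≤ len(a) (else a[i] raises IndexError).
def Pre_solve (k : Int) (n : Int) (a : List Int) : Prop := 1 ≤ n ∧ n ≤ (a.length : Int)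
instance (k : Int) (n : Int) (a : List Int) : Decidable (Pre_solve k n a) := by unfold Pre_solve; infer_instance
def pvWitness_solve : Int × Int × List Int := (10, 3, [1, 4, 6])

def Spec_solve (k : Int) (n : Int) (a : List Int) (out : Int) : Prop := out = solve_alt k n a
instance (k : Int) (n : Int) (a : List Int) (out : Int) : Decidable (Spec_solve k n a out) := by unfold Spec_solve; infer_instance

-- ===== CLAIM (what is proved, stated in full; the proofs are below) =====
def Claim_equal_solve : Prop := ∀ (k : Int) (n : Int) (a : List Int), Dom_solve k n a → Pre_solve k n a → Spec_solve k n a (solve k n a)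

-- ===== LEMMAS AND PROOFS =====

-- in an ascending Pairwise (≤) list every member is ≤ the last element
theorem pv_pairwise_le_getLast : ∀ (xs : List Int), xs.Pairwise (· ≤ ·) → ∀ (hne : xs ≠ []), ∀ y ∈ xs, y ≤ xs.getLast hne := by
  intro xs
  induction xs with
  | nil => intro _ hne; exact absurd rfl hne
  | cons x t ih =>
    intro h hne y hy
    rcases List.pairwise_cons.mp h with ⟨hx, ht⟩
    cases t with
    | nil =>
      simp only [List.mem_singleton] at hy
      simp [hy, List.getLast]
    | cons z t' =>
      rw [List.getLast_cons (by simp)]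
      rcases List.mem_cons.mp hy with rfl | hy'
      · exact hx _ (List.getLast_mem _)
      · exact ih ht (by simp) y hy'

-- the consecutive differences over range(a0, b) telescope to f b - f a0
theorem pv_telescope (f : Int → Int) (a0 b : Int) (h : a0 ≤ b) :
    (((PySem.List.pyRange a0 b 1).map (fun i => f (i + 1) - f i)).sum) = f b - f a0 := by
  obtain ⟨m, hm⟩ : ∃ m : Nat, b = a0 + m := ⟨(b - a0).toNat, by omega⟩
  subst hm
  clear h
  induction m generalizing a0 with
  | zero =>
    rw [show a0 + ((0:Nat):Int) = a0 by simp, PySem.List.pyRange_one_eq_nil le_rfl]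
    simp
  | succ m ih =>
    push_cast
    rw [PySem.List.pyRange_one_cons (by omega), List.map_cons, List.sum_cons]
    rw [show a0 + ((m : Int) + 1) = (a0 + 1) + (m : Int) by ring]
    have := ih (a0 + 1)
    push_cast at this
    rw [this]
    ring

-- B's 'if gap > mg then gap else mg' loop is the running max of the projected values
theorem pv_fold_is_max {α : Type} (f : α → Int) (xs : List α) (init : Int) :
    xs.foldl (fun mg x => if f x > mg then f x else mg) init = (xs.map f).foldl max init := by
  induction xs generalizing init with
  | nil => rfl
  | cons x t ih =>
    simp only [List.foldl_cons, List.map_cons]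
    rw [show (if f x > init then f x else init) = max init (f x) by rw [max_def]; split_ifs <;> omega]
    exact ih (max init (f x))

theorem solve_eq_alt (k : Int) (n : Int) (a : List Int) (h1 : 1 ≤ n) :
    solve k n a = solve_alt k n a := by
  unfold solve solve_alt
  simp only []
  set aD : Int → Int := fun i => PySem.List.pyGetD a i 0 with haD
  set gap : Int → Int := fun i => aD (i + 1) - aD i with hgap
  set wrap : Int := k - aD (n - 1) + aD 0 with hwrap
  set gaps : List Int := (PySem.List.pyRange 0 (n - 1) 1).map gap with hgaps
  -- the distance list is gaps ++ [wrap]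
  have hsplit : (PySem.List.pyRange 0 n 1).map (fun i =>
      if i = n - 1 then k - aD i + aD 0 else aD (i + 1) - aD i) = gaps ++ [wrap] := by
    have hr : PySem.List.pyRange 0 n 1 = PySem.List.pyRange 0 (n - 1) 1 ++ [n - 1] := by
      rw [show n = (n - 1) + 1 by ring]
      rw [PySem.List.pyRange_one_succ_right (by omega)]
      simp
    rw [hr, List.map_append, List.map_singleton, if_pos rfl]
    congr 1
    apply List.map_congr_left
    intro i hi
    have hi' := (PySem.List.mem_pyRange_one.mp hi).2
    rw [if_neg (by omega)]
  rw [hsplit]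
  -- B's fold is the running max of gaps starting at wrap
  have hB : (PySem.List.pyRange 0 (n - 1) 1).foldl (fun mg i =>
      if gap i > mg then gap i else mg) wrap = gaps.foldl max wrap := by
    rw [pv_fold_is_max gap _ wrap, ← hgaps]
  set M : Int := gaps.foldl max wrap with hM
  -- sorted-list facts
  set s : List Int := PySem.List.sorted (gaps ++ [wrap]) (fun x => x) false with hs
  have hne : s ≠ [] := by
    rw [hs, Ne, PySem.List.sorted_eq_nil_iff]
    simp
  have hperm : s.Perm (gaps ++ [wrap]) := PySem.List.sorted_perm _ _ _
  set L : Int := s.getLast hne with hL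
  -- the popped last element L equals the running max M
  have hLmem : L ∈ gaps ++ [wrap] := hperm.mem_iff.mp (List.getLast_mem hne)
  have hLmax : ∀ y ∈ gaps ++ [wrap], y ≤ L := by
    intro y hy
    exact pv_pairwise_le_getLast s (PySem.List.sorted_pairwise _ _) hne y (hperm.mem_iff.mpr hy)
  have hMfacts := PySem.List.le_foldl_max gaps wrap
  have hMub : ∀ y ∈ gaps ++ [wrap], y ≤ M := by
    intro y hy
    rcases List.mem_append.mp hy with h | h
    · exact hMfacts.2 y h
    · simp only [List.mem_singleton] at h; subst h; exact hMfacts.1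
  have hMmem : M ∈ gaps ++ [wrap] := by
    rcases PySem.List.foldl_max_mem gaps wrap with h | h
    · rw [hM, h]; simp
    · exact List.mem_append_left _ h
  have hLM : L = M := le_antisymm (hMub L hLmem) (hLmax M hMmem)
  -- the circular gaps sum to k (telescoping)
  have hsum : (gaps ++ [wrap]).sum = k := by
    rw [List.sum_append, hgaps]
    have := pv_telescope aD 0 (n - 1) (by omega)
    simp only [hgap]
    rw [this]
    simp only [List.sum_cons, List.sum_nil, hwrap]
    ring
  -- sum of dropLast = sum minus last
  have hdrop : s.dropLast.sum + L = s.sum := by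
    conv_rhs => rw [← List.dropLast_append_getLast hne]
    rw [List.sum_append, ← hL]
    simp
  have hssum : s.sum = k := by rw [hperm.sum_eq, hsum]
  rw [hB]
  omega

-- ===== VERDICT (by name: the statement is the Claim_ definition above) =====
theorem solve_spec : Claim_equal_solve := by
  intro k n a _ hpre
  exact solve_eq_alt k n a hpre.1
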